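-- pv_equiv track=rewrite | github.com/pirent/python-playground | thinkpython/exercise1202.py | index_anagram_list_by_length
-- ===== SOURCE A (Python) =====
-- def index_anagram_list_by_length(anagram_list, number_to_filter=None, len_must_greater_than=1):
--   res = {}
--   for k,v in anagram_list.items():
--     length = len(v)
--     if len_must_greater_than > length:
--       continue
--     if number_to_filter and number_to_filter != length:
--       continue
--     temp_list = res.setdefault(length, [])
--     temp_list.append(v)
--   return res
-- ===== SOURCE B (Python) =====
-- def index_anagram_list_by_length(anagram_list, number_to_filter=None, len_must_greater_than=1):
--   kept = [v for v in anagram_list.values()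
--           if len(v) >= len_must_greater_than
--           and (not number_to_filter or number_to_filter == len(v))]
--   lengths = list(dict.fromkeys(len(v) for v in kept))
--   return {L: [v for v in kept if len(v) == L] for L in lengths}
-- ===== Notes on version B (the rewrite author's own statement) =====
-- stated objective: alternative
-- what changed: Replaces the single incremental setdefault/append accumulation loop with a two-pass shape: filter once into a kept list, dedup the lengths in first-occurrence order, then build each group by a per-length scan of the kept list.
import Mathlib
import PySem

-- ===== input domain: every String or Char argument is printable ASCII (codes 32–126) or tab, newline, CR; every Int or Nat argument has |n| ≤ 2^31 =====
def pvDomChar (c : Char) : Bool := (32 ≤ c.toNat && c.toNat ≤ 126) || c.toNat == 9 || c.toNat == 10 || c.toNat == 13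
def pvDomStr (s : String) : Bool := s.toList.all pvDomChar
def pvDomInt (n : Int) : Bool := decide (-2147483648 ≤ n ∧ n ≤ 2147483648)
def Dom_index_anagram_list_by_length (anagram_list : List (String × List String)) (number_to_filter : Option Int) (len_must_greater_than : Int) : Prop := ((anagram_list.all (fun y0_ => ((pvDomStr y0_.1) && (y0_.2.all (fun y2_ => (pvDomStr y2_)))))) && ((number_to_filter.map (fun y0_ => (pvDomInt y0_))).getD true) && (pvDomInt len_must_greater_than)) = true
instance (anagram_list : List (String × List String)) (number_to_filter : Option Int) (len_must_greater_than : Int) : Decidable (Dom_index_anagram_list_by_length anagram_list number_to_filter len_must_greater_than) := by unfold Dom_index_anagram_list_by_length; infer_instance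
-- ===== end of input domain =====

-- B replaces A's incremental setdefault/append loop by a filter-then-group-per-distinct-length pass (alternative decomposition, same results).

-- ===== PORT A =====
-- for k,v in anagram_list.items(): skip if len_must_greater_than > len(v) or (number_to_filter and number_to_filter != len(v));
-- res.setdefault(len(v), []).append(v)  is  res.modify (len v) [] (· ++ [v])
def index_anagram_list_by_length (anagram_list : List (String × List String)) (number_to_filter : Option Int) (len_must_greater_than : Int) : List (Int × List (List String)) :=
  let res := (PySem.Dict.ofList anagram_list).items.foldl (fun res kv =>
    let length : Int := (kv.2.length : Int)
    if len_must_greater_than > length then res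
    else if (match number_to_filter with
             | none => false
             | some n => !(n == 0) && !(n == length)) then res
    else res.modify length [] (· ++ [kv.2])) PySem.Dict.empty
  res.items

-- ===== PORT B =====
def pvKeepB (number_to_filter : Option Int) (len_must_greater_than : Int) (v : List String) : Bool :=
  decide ((v.length : Int) ≥ len_must_greater_than) &&
  ((match number_to_filter with | none => true | some n => n == 0) ||
   (match number_to_filter with | none => false | some n => n == (v.length : Int)))

def index_anagram_list_by_length_alt (anagram_list : List (String × List String)) (number_to_filter : Option Int) (len_must_greater_than : Int) : List (Int × List (List String)) :=
  let kept := (PySem.Dict.ofList anagram_list).values.filter (pvKeepB number_to_filter len_must_greater_than)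
  let lengths := PySem.List.dedup (kept.map (fun v => (v.length : Int)))
  lengths.map (fun L => (L, kept.filter (fun v => (v.length : Int) == L)))

-- ===== PRECONDITION & SPEC =====
def Spec_index_anagram_list_by_length (anagram_list : List (String × List String)) (number_to_filter : Option Int) (len_must_greater_than : Int) (out : List (Int × List (List String))) : Prop := out = index_anagram_list_by_length_alt anagram_list number_to_filter len_must_greater_than
instance (anagram_list : List (String × List String)) (number_to_filter : Option Int) (len_must_greater_than : Int) (out : List (Int × List (List String))) : Decidable (Spec_index_anagram_list_by_length anagram_list number_to_filter len_must_greater_than out) := by unfold Spec_index_anagram_list_by_length; infer_instance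

-- ===== CLAIM (what is proved, stated in full; the proofs are below) =====
def Claim_equal_index_anagram_list_by_length : Prop := ∀ (anagram_list : List (String × List String)) (number_to_filter : Option Int) (len_must_greater_than : Int), Dom_index_anagram_list_by_length anagram_list number_to_filter len_must_greater_than → Spec_index_anagram_list_by_length anagram_list number_to_filter len_must_greater_than (index_anagram_list_by_length anagram_list number_to_filter len_must_greater_than)

-- ===== LEMMAS AND PROOFS =====

-- the grouped table B builds, abstracted over the kept values
def pvGroups (us : List (List String)) : List (Int × List (List String)) :=
  (PySem.List.dedup (us.map (fun v => (v.length : Int)))).map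
    (fun L => (L, us.filter (fun v => (v.length : Int) == L)))

-- a guarded foldl over dict items that only uses the value is a foldl over the filtered values
theorem pv_fold_items_filter {β : Type} (p : List String → Bool) (g : β → List String → β) :
    ∀ (l : List (String × List String)) (init : β),
      l.foldl (fun d kv => if p kv.2 then g d kv.2 else d) init
        = ((l.map (fun kv => kv.2)).filter p).foldl g init := by
  intro l
  induction l with
  | nil => intro init; rfl
  | cons kv l ih =>
    intro init
    by_cases h : p kv.2 = true <;> simp [h, ih]

-- first-match lookup in a keyed map-built assoc list returns the value function at the key
theorem pv_get?_mk_map (f : Int → List (List String)) (D : List Int) (k : Int) :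
    (PySem.Dict.mk (D.map (fun L => (L, f L)))).get? k
      = if k ∈ D then some (f k) else none := by
  induction D with
  | nil => simp [PySem.Dict.get?]
  | cons L D ih =>
    simp only [List.map_cons, PySem.Dict.get?_mk_cons, ih]
    by_cases h : L = k
    · subst h; simp
    · simp [h, Ne.symm h]

theorem pv_groups_step (us : List (List String)) (w : List String) :
    (PySem.Dict.mk (pvGroups us)).modify (w.length : Int) [] (· ++ [w]) =
      PySem.Dict.mk (pvGroups (us ++ [w])) := by
  have hget := pv_get?_mk_map
    (fun L => us.filter (fun v => ((v.length : Int) == L))) 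
    (PySem.List.dedup (us.map (fun v => (v.length : Int)))) (w.length : Int)
  by_cases hk : (w.length : Int) ∈ us.map (fun v => (v.length : Int))
  · -- the length already has a group: modify updates it in place
    have hmemD : (w.length : Int) ∈ PySem.List.dedup (us.map (fun v => (v.length : Int))) := by
      rw [PySem.List.dedup_eq_ofList, PySem.Set.mem_ofList]; exact hk
    have hgs : (PySem.Dict.mk (pvGroups us)).get? (w.length : Int)
        = some (us.filter (fun v => ((v.length : Int) == (w.length : Int)))) := by
      simp only [pvGroups]; rw [hget, if_pos hmemD]
    have hc : (PySem.Dict.mk (pvGroups us)).contains (w.length : Int) = true := by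
      rcases Bool.eq_false_or_eq_true ((PySem.Dict.mk (pvGroups us)).contains (w.length : Int)) with h | h
      · exact h
      · rw [← PySem.Dict.get?_eq_none_iff_contains, hgs] at h; cases h
    have hD : PySem.List.dedup ((us ++ [w]).map (fun v => (v.length : Int)))
        = PySem.List.dedup (us.map (fun v => (v.length : Int))) := by
      rw [List.map_append, PySem.List.dedup_eq_ofList, PySem.List.dedup_eq_ofList,
        List.map_singleton, PySem.Set.ofList_append_singleton, PySem.Set.add]
      have : (PySem.Set.ofList (us.map (fun v => (v.length : Int)))).contains (w.length : Int) = true := by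
        rw [PySem.Set.contains, List.contains_eq_mem, decide_eq_true_eq, PySem.Set.mem_ofList]
        exact hk
      simp only [this, if_true]
    simp only [PySem.Dict.modify, PySem.Dict.getD, hgs, Option.getD_some,
      PySem.Dict.insert, hc, if_pos]
    apply PySem.Dict.ext
    simp only [pvGroups, hD, List.map_map]
    apply List.map_congr_left
    intro L hL
    by_cases hLk : L = (w.length : Int)
    · subst hLk
      simp [List.filter_append]
    · have : ((w.length : Int) == L) = false := by simp [Ne.symm hLk]
      simp [hLk, List.filter_append, this]
  · -- new length: modify appends a fresh group
    have hmemD : (w.length : Int) ∉ PySem.List.dedup (us.map (fun v => (v.length : Int))) := by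
      rw [PySem.List.dedup_eq_ofList, PySem.Set.mem_ofList]; exact hk
    have hgs : (PySem.Dict.mk (pvGroups us)).get? (w.length : Int) = none := by
      simp only [pvGroups]; rw [hget, if_neg hmemD]
    have hc : (PySem.Dict.mk (pvGroups us)).contains (w.length : Int) = false := by
      rw [← PySem.Dict.get?_eq_none_iff_contains]; exact hgs
    have hD : PySem.List.dedup ((us ++ [w]).map (fun v => (v.length : Int)))
        = PySem.List.dedup (us.map (fun v => (v.length : Int))) ++ [(w.length : Int)] := by
      rw [List.map_append, PySem.List.dedup_eq_ofList, PySem.List.dedup_eq_ofList,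
        List.map_singleton, PySem.Set.ofList_append_singleton, PySem.Set.add]
      have : (PySem.Set.ofList (us.map (fun v => (v.length : Int)))).contains (w.length : Int) = false := by
        rw [PySem.Set.contains, List.contains_eq_mem, decide_eq_false_iff_not, PySem.Set.mem_ofList]
        exact hk
      simp only [this, Bool.false_eq_true, if_false]
    have hfilt : us.filter (fun v => ((v.length : Int) == (w.length : Int))) = [] := by
      rw [List.filter_eq_nil_iff]
      intro v hv hbeq
      exact hk (List.mem_map.mpr ⟨v, hv, by simpa using hbeq⟩)
    simp only [PySem.Dict.modify, PySem.Dict.getD, hgs, Option.getD_none,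
      PySem.Dict.insert, hc, Bool.false_eq_true, if_false]
    apply PySem.Dict.ext
    simp only [pvGroups]
    rw [hD, List.map_append, List.map_singleton]
    congr 1
    · apply List.map_congr_left
      intro L hL
      have hLus : L ∈ us.map (fun v => (v.length : Int)) := by
        rw [PySem.List.dedup_eq_ofList, PySem.Set.mem_ofList] at hL; exact hL
      have hLk : ((w.length : Int) == L) = false := by
        simp; rintro rfl; exact hk hLus
      simp [List.filter_append, hLk]
    · simp [List.filter_append, hfilt]

-- main invariant: folding modify over ws extends the grouped table
theorem pv_fold_groups :
    ∀ (ws us : List (List String)),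
      (ws.foldl (fun d v => d.modify (v.length : Int) [] (· ++ [v]))
        (PySem.Dict.mk (pvGroups us))).items = pvGroups (us ++ ws) := by
  intro ws
  induction ws with
  | nil => intro us; simp
  | cons w ws ih =>
    intro us
    have h1 : (us ++ [w]) ++ ws = us ++ (w :: ws) := by simp
    calc ((w :: ws).foldl (fun d v => d.modify (v.length : Int) [] (· ++ [v]))
            (PySem.Dict.mk (pvGroups us))).items
        = (ws.foldl (fun d v => d.modify (v.length : Int) [] (· ++ [v]))
            (PySem.Dict.mk (pvGroups (us ++ [w])))).items := by
          rw [List.foldl_cons, pv_groups_step]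
      _ = pvGroups ((us ++ [w]) ++ ws) := ih (us ++ [w])
      _ = pvGroups (us ++ (w :: ws)) := by rw [h1]

-- A's keep-test equals B's keep-test, pointwise
theorem pv_keep_eq (number_to_filter : Option Int) (len_must_greater_than : Int) (v : List String) :
    (if len_must_greater_than > (v.length : Int) then false
     else if (match number_to_filter with
              | none => false
              | some n => !(n == 0) && !(n == (v.length : Int))) then false
     else true) = pvKeepB number_to_filter len_must_greater_than v := by
  cases number_to_filter with
  | none =>
    by_cases h1 : len_must_greater_than > (v.length : Int) <;> simp [pvKeepB, h1] <;> omega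
  | some n =>
    simp only [pvKeepB]
    by_cases h1 : len_must_greater_than > (v.length : Int) <;>
      by_cases h2 : n = 0 <;> by_cases h3 : n = (v.length : Int) <;>
        simp [h1, h2, h3] <;> omega

-- ===== VERDICT (by name: the statement is the Claim_ definition above) =====
theorem index_anagram_list_by_length_spec : Claim_equal_index_anagram_list_by_length := by
  intro anagram_list number_to_filter len_must_greater_than _
  unfold Spec_index_anagram_list_by_length
  show ((PySem.Dict.ofList anagram_list).items.foldl
      (fun res kv =>
        if len_must_greater_than > (kv.2.length : Int) then res
        else if (match number_to_filter with
                 | none => false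
                 | some n => !(n == 0) && !(n == (kv.2.length : Int))) then res
        else res.modify (kv.2.length : Int) [] (· ++ [kv.2])) PySem.Dict.empty).items
    = pvGroups ((PySem.Dict.ofList anagram_list).values.filter
        (pvKeepB number_to_filter len_must_greater_than))
  have hstep :
      (fun (res : PySem.Dict Int (List (List String))) (kv : String × List String) =>
        if len_must_greater_than > (kv.2.length : Int) then res
        else if (match number_to_filter with
                 | none => false
                 | some n => !(n == 0) && !(n == (kv.2.length : Int))) then res
        else res.modify (kv.2.length : Int) [] (· ++ [kv.2]))
      = (fun res kv =>
        if pvKeepB number_to_filter len_must_greater_than kv.2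
        then res.modify (kv.2.length : Int) [] (· ++ [kv.2]) else res) := by
    funext res kv
    rw [← pv_keep_eq number_to_filter len_must_greater_than kv.2]
    split_ifs <;> simp_all
  rw [hstep]
  have h2 := pv_fold_items_filter (pvKeepB number_to_filter len_must_greater_than)
    (fun d v => d.modify (v.length : Int) [] (· ++ [v]))
    (PySem.Dict.ofList anagram_list).items PySem.Dict.empty
  refine Eq.trans (congrArg PySem.Dict.items h2) ?_
  simpa [PySem.Dict.values] using
    pv_fold_groups (((PySem.Dict.ofList anagram_list).items.map (fun kv => kv.2)).filter
      (pvKeepB number_to_filter len_must_greater_than)) []
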